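-- pv_equiv track=rewrite | github.com/maxblunck/irony_detection | pos_feature.py | to_bigram_vector
-- ===== SOURCE A (Python) =====
-- def to_bigram_vector(bag_of_bigrams, corpus): #corpus is the bigram_list
--     review_vector_list = []
--
--     for entry in corpus:
--         review_vector = []
--
--         for bigram in bag_of_bigrams:
--             review_vector.append(entry.count(bigram))
--
--         review_vector_list.append(review_vector)
--
--     return review_vector_list
-- ===== SOURCE B (Python) =====
-- def to_bigram_vector(bag_of_bigrams, corpus):
--     # Inverted traversal: precompute bigram -> column positions once, then for
--     # each entry start from a zero vector and scatter-increment the columns of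
--     # each word the entry contains (instead of scanning the entry per vocab word).
--     index = {}
--     for i, bigram in enumerate(bag_of_bigrams):
--         index.setdefault(bigram, []).append(i)
--     review_vector_list = []
--     for entry in corpus:
--         vec = [0] * len(bag_of_bigrams)
--         for word in entry:
--             for i in index.get(word, ()):
--                 vec[i] += 1
--         review_vector_list.append(vec)
--     return review_vector_list
-- ===== Notes on version B (the rewrite author's own statement) =====
-- stated objective: faster
-- what changed: B inverts the traversal: it builds a bigram -> column-positions index over the vocabulary once, then for each corpus entry starts from a zero vector and scatter-increments the indexed columns of each word the entry contains, instead of scanning the whole entry once per vocabulary bigram with entry.count.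
import Mathlib
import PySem

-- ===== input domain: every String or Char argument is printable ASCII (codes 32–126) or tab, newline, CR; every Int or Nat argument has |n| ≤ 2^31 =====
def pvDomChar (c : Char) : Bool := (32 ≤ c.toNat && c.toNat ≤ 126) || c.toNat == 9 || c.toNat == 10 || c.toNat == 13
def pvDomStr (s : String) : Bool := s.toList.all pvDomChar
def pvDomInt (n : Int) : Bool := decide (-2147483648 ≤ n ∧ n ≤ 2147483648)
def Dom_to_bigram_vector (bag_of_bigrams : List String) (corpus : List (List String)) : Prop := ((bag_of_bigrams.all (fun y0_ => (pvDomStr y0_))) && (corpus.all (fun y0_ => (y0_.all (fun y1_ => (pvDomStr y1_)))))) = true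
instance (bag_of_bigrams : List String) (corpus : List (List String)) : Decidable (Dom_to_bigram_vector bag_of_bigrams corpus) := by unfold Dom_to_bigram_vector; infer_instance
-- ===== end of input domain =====

-- B inverts the traversal: a column index bigram -> positions is built once, and each entry
-- scatter-increments a zero vector over its own words (alternative decomposition of the same counts).
-- ===== PORT A =====
def to_bigram_vector (bag_of_bigrams : List String) (corpus : List (List String)) : List (List Int) :=
  corpus.foldl (fun review_vector_list entry =>
    review_vector_list ++
      [bag_of_bigrams.foldl (fun review_vector bigram =>
        review_vector ++ [(PySem.List.count entry bigram : Int)]) []]) []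

-- ===== PORT B =====
-- Python's `enumerate` (indices provably ≥ 0 here) is ported as `List.zipIdx` with Nat indices.
def bIndex (bag_of_bigrams : List String) : PySem.Dict String (List Nat) :=
  bag_of_bigrams.zipIdx.foldl
    (fun d p => d.insert p.1 (d.getD p.1 [] ++ [p.2])) PySem.Dict.empty

-- vec[i] += 1 (i is always in range when B uses it)
def bIncr (vec : List Int) (i : Nat) : List Int := vec.set i (vec.getD i 0 + 1)

def to_bigram_vector_alt (bag_of_bigrams : List String) (corpus : List (List String)) : List (List Int) :=
  let index := bIndex bag_of_bigrams
  corpus.foldl (fun review_vector_list entry =>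
    review_vector_list ++
      [entry.foldl (fun vec word => (index.getD word []).foldl bIncr vec)
        (List.replicate bag_of_bigrams.length 0)]) []

-- ===== PRECONDITION & SPEC =====
def Spec_to_bigram_vector (bag_of_bigrams : List String) (corpus : List (List String)) (out : List (List Int)) : Prop := out = to_bigram_vector_alt bag_of_bigrams corpus
instance (bag_of_bigrams : List String) (corpus : List (List String)) (out : List (List Int)) : Decidable (Spec_to_bigram_vector bag_of_bigrams corpus out) := by unfold Spec_to_bigram_vector; infer_instance

-- ===== CLAIM (what is proved, stated in full; the proofs are below) =====
def Claim_equal_to_bigram_vector : Prop := ∀ (bag_of_bigrams : List String) (corpus : List (List String)), Dom_to_bigram_vector bag_of_bigrams corpus → Spec_to_bigram_vector bag_of_bigrams corpus (to_bigram_vector bag_of_bigrams corpus)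

-- ===== LEMMAS AND PROOFS =====

-- the index dict sends w to the (appended) positions of w collected so far
theorem getD_bIndex_fold (l : List (String × Nat)) (d : PySem.Dict String (List Nat)) (w : String) :
    (l.foldl (fun d p => d.insert p.1 (d.getD p.1 [] ++ [p.2])) d).getD w []
      = d.getD w [] ++ (l.filter (fun p => p.1 == w)).map Prod.snd := by
  induction l generalizing d with
  | nil => simp
  | cons p t ih =>
    simp only [List.foldl_cons, ih, List.filter_cons]
    by_cases h : p.1 = w
    · simp [h]
    · simp [h, PySem.Dict.getD_insert, Ne.symm h]

-- how often column j occurs in the filtered-enumerate position list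
theorem count_zipIdx_filter (w : String) (l : List String) (k j : Nat) :
    (((l.zipIdx k).filter (fun p => p.1 == w)).map Prod.snd).count j
      = if l[j - k]? = some w ∧ k ≤ j then 1 else 0 := by
  induction l generalizing k with
  | nil => simp
  | cons b t ih =>
    simp only [List.zipIdx_cons, List.filter_cons]
    by_cases hj : j = k
    · subst hj
      have h0 : j - j = 0 := by omega
      have ht : (((t.zipIdx (j+1)).filter (fun p => p.1 == w)).map Prod.snd).count j = 0 := by
        rw [ih (j+1)]; simp
      by_cases hb : b = w
      · simp [hb, ht]
      · simp [hb, ht]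
    · have hidx : (b :: t)[j - k]? = (if k ≤ j then t[j - (k+1)]? else some b) := by
        by_cases hk : k ≤ j
        · have : j - k = (j - (k+1)) + 1 := by omega
          simp [this, hk]
        · have : j - k = 0 := by omega
          simp [this, hk]
      rw [hidx]
      by_cases hk : k ≤ j
      · have hk1 : k + 1 ≤ j := by omega
        by_cases hb : b = w
        · simp [hb, ih (k+1), hk, hk1, Ne.symm hj]
        · simp [hb, ih (k+1), hk, hk1]
      · have hk1 : ¬ (k + 1 ≤ j) := by omega
        by_cases hb : b = w
        · simp [hb, ih (k+1), hk, hk1, Ne.symm hj]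
        · simp [hb, ih (k+1), hk, hk1]

theorem count_bIndex (bag : List String) (w : String) (j : Nat) :
    ((bIndex bag).getD w []).count j = if bag[j]? = some w then 1 else 0 := by
  rw [bIndex, getD_bIndex_fold]
  simp only [PySem.Dict.getD_empty, List.nil_append]
  rw [count_zipIdx_filter]
  simp

theorem length_foldl_bIncr (S : List Nat) (vec : List Int) :
    (S.foldl bIncr vec).length = vec.length := by
  induction S generalizing vec with
  | nil => rfl
  | cons i t ih => simp [ih, bIncr]

theorem getD_bIncr (vec : List Int) (i j : Nat) (hj : j < vec.length) :
    (bIncr vec i).getD j 0 = vec.getD j 0 + (if i = j then 1 else 0) := by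
  unfold bIncr
  by_cases h : i = j
  · subst h
    simp [List.getD_eq_getElem?_getD, hj]
  · simp [List.getD_eq_getElem?_getD, List.getElem?_set_ne h, h]

theorem getD_foldl_bIncr (S : List Nat) (vec : List Int) (j : Nat) (hj : j < vec.length) :
    (S.foldl bIncr vec).getD j 0 = vec.getD j 0 + S.count j := by
  induction S generalizing vec with
  | nil => simp
  | cons i t ih =>
    have hlen : j < (bIncr vec i).length := by simp [bIncr]; omega
    simp only [List.foldl_cons, ih _ hlen, getD_bIncr vec i j hj, List.count_cons]
    by_cases h : i = j <;> simp [h] <;> ring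

theorem length_entry_fold (bag : List String) (entry : List String) (vec : List Int) :
    (entry.foldl (fun v w => (((bIndex bag).getD w []).foldl bIncr v)) vec).length = vec.length := by
  induction entry generalizing vec with
  | nil => rfl
  | cons w t ih => simp [ih, length_foldl_bIncr]

theorem getD_entry_fold (bag : List String) (entry : List String) (vec : List Int) (j : Nat)
    (hj : j < vec.length) (hb : j < bag.length) :
    (entry.foldl (fun v w => (((bIndex bag).getD w []).foldl bIncr v)) vec).getD j 0
      = vec.getD j 0 + (entry.count bag[j] : Int) := by
  induction entry generalizing vec with
  | nil => simp
  | cons w t ih =>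
    have hlen : j < (((bIndex bag).getD w []).foldl bIncr vec).length := by
      rw [length_foldl_bIncr]; exact hj
    simp only [List.foldl_cons, ih _ hlen, getD_foldl_bIncr _ _ _ hj, count_bIndex,
      List.getElem?_eq_getElem hb, List.count_cons]
    by_cases h : bag[j] = w
    · simp [h]; ring
    · simp [h, Ne.symm h]

theorem entry_fold_eq_map (bag : List String) (entry : List String) :
    entry.foldl (fun v w => (((bIndex bag).getD w []).foldl bIncr v))
        (List.replicate bag.length (0 : Int))
      = bag.map (fun b => (entry.count b : Int)) := by
  apply List.ext_getElem
  · simp [length_entry_fold]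
  · intro j h1 h2
    have hb : j < bag.length := by simpa using h2
    have hv : j < (List.replicate bag.length (0 : Int)).length := by simpa using hb
    have := getD_entry_fold bag entry (List.replicate bag.length 0) j hv hb
    rw [List.getD_eq_getElem _ _ h1] at this
    simp only [this, List.getElem_map]
    simp [List.getD_eq_getElem?_getD, hb]

-- ===== VERDICT (by name: the statement is the Claim_ definition above) =====
theorem to_bigram_vector_spec : Claim_equal_to_bigram_vector := by
  intro bag corpus _
  unfold Spec_to_bigram_vector to_bigram_vector to_bigram_vector_alt
  simp only [PySem.List.foldl_append_singleton_eq_map, List.nil_append, PySem.List.count_eq]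
  apply List.map_congr_left
  intro entry _
  exact (entry_fold_eq_map bag entry).symm
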